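-- pv_equiv track=rewrite | github.com/dinesh01ameh/Scrapeagent | features/nlp/complex_logic_processor.py | _determine_strategy_for_action
-- ===== SOURCE A (Python) =====
-- def _determine_strategy_for_action(action: str) -> str:
--     """Determine the best extraction strategy for a given action"""
--     action_lower = action.lower()
--
--     if any(word in action_lower for word in ["navigate", "go to", "click"]):
--         return "browser_automation"
--     elif any(word in action_lower for word in ["analyze", "understand"]):
--         return "llm_analysis"
--     elif any(word in action_lower for word in ["extract", "get", "scrape"]):
--         return "css_selector"
--     else:
--         return "auto"
-- ===== SOURCE B (Python) =====
-- _KEYWORD_PRIORITY = {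
--     "navigate": 0, "go to": 0, "click": 0,
--     "analyze": 1, "understand": 1,
--     "extract": 2, "get": 2, "scrape": 2,
-- }
-- _STRATEGIES = ["browser_automation", "llm_analysis", "css_selector", "auto"]
--
--
-- def _determine_strategy_for_action(action: str) -> str:
--     """Determine the best extraction strategy for a given action"""
--     s = action.lower()
--     best = min((p for kw, p in _KEYWORD_PRIORITY.items() if kw in s), default=3)
--     return _STRATEGIES[best]
-- ===== Notes on version B (the rewrite author's own statement) =====
-- stated objective: simpler
-- what changed: Replaces the if/elif cascade of any()-membership tests with one keyword->priority table folded by min (lowest matching priority wins, default 3 = auto), then a single indexed lookup into the strategy list.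
import Mathlib
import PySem

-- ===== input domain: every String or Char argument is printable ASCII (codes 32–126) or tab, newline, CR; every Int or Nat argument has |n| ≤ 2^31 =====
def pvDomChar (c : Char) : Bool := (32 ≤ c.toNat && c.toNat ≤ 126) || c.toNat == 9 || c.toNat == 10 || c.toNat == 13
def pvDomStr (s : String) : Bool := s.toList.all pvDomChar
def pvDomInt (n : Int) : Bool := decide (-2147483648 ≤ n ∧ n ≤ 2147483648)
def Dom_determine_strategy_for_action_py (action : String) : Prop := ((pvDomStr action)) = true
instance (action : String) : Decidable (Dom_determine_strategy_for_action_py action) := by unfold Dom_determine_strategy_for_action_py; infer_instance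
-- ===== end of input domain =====

-- B replaces the if/elif cascade by a keyword->priority table folded by min, with one indexed
-- lookup into the strategy list (objective: simpler).


-- ===== PORT A =====
def determine_strategy_for_action_py (action : String) : String :=
  let action_lower := PySem.Str.lower action
  if PySem.Str.isIn "navigate" action_lower || PySem.Str.isIn "go to" action_lower ||
     PySem.Str.isIn "click" action_lower then "browser_automation"
  else if PySem.Str.isIn "analyze" action_lower || PySem.Str.isIn "understand" action_lower then
    "llm_analysis"
  else if PySem.Str.isIn "extract" action_lower || PySem.Str.isIn "get" action_lower ||
     PySem.Str.isIn "scrape" action_lower then "css_selector"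
  else "auto"

-- ===== PORT B =====
def pvKeywordPriority : List (String × Nat) :=
  [("navigate", 0), ("go to", 0), ("click", 0),
   ("analyze", 1), ("understand", 1),
   ("extract", 2), ("get", 2), ("scrape", 2)]

def pvStrategies : List String := ["browser_automation", "llm_analysis", "css_selector", "auto"]

def determine_strategy_for_action_py_alt (action : String) : String :=
  let s := PySem.Str.lower action
  -- min((p for kw, p in _KEYWORD_PRIORITY.items() if kw in s), default=3)
  let best := pvKeywordPriority.foldl
    (fun b kp => if PySem.Str.isIn kp.1 s then min b kp.2 else b) 3
  pvStrategies.getD best "auto"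

-- ===== PRECONDITION & SPEC =====
def Spec_determine_strategy_for_action_py (action : String) (out : String) : Prop := out = determine_strategy_for_action_py_alt action
instance (action : String) (out : String) : Decidable (Spec_determine_strategy_for_action_py action out) := by unfold Spec_determine_strategy_for_action_py; infer_instance

-- ===== CLAIM (what is proved, stated in full; the proofs are below) =====
def Claim_equal_determine_strategy_for_action_py : Prop := ∀ (action : String), Dom_determine_strategy_for_action_py action → Spec_determine_strategy_for_action_py action (determine_strategy_for_action_py action)

-- ===== LEMMAS AND PROOFS =====

set_option maxHeartbeats 2000000 in
theorem determine_strategy_for_action_py_spec' (action : String) :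
    determine_strategy_for_action_py action = determine_strategy_for_action_py_alt action := by
  unfold determine_strategy_for_action_py determine_strategy_for_action_py_alt
  set s := PySem.Str.lower action with hs
  simp only [pvKeywordPriority, List.foldl, pvStrategies]
  generalize PySem.Str.isIn "navigate" s = b1
  generalize PySem.Str.isIn "go to" s = b2
  generalize PySem.Str.isIn "click" s = b3
  generalize PySem.Str.isIn "analyze" s = b4
  generalize PySem.Str.isIn "understand" s = b5
  generalize PySem.Str.isIn "extract" s = b6
  generalize PySem.Str.isIn "get" s = b7
  generalize PySem.Str.isIn "scrape" s = b8
  revert b1 b2 b3 b4 b5 b6 b7 b8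
  decide

-- ===== VERDICT (by name: the statement is the Claim_ definition above) =====
theorem determine_strategy_for_action_py_spec : Claim_equal_determine_strategy_for_action_py := by
  intro action _
  exact determine_strategy_for_action_py_spec' action
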